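-- pv_equiv track=rewrite | github.com/QWERTYjc/GradeOS | GradeOS-Platform/backend/src/graphs/batch_grading.py | _sanitize_pages
-- ===== SOURCE A (Python) =====
-- from typing import Optional, List, Dict, Any, Literal, Tuple
--
-- def _coerce_int(value: Any) -> Optional[int]:
--     try:
--         return int(value)
--     except (TypeError, ValueError):
--         return None
--
-- def _sanitize_pages(raw_pages: Any, total_pages: int) -> List[int]:
--     if not isinstance(raw_pages, (list, tuple)):
--         return []
--     cleaned = []
--     for item in raw_pages:
--         idx = _coerce_int(item)
--         if idx is None:
--             continue
--         if 0 <= idx < total_pages: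
--             cleaned.append(idx)
--     return sorted(set(cleaned))
-- ===== SOURCE B (Python) =====
-- from typing import Optional, List, Any
--
-- def _coerce_int(value: Any) -> Optional[int]:
--     try:
--         return int(value)
--     except (TypeError, ValueError):
--         return None
--
-- def _sanitize_pages(raw_pages: Any, total_pages: int) -> List[int]:
--     if not isinstance(raw_pages, (list, tuple)):
--         return []
--     out: List[int] = []
--     for item in raw_pages:
--         idx = _coerce_int(item)
--         if idx is None:
--             continue
--         if 0 <= idx < total_pages:
--             lo, hi = 0, len(out)
--             while lo < hi:
--                 mid = (lo + hi) // 2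
--                 if out[mid] < idx:
--                     lo = mid + 1
--                 else:
--                     hi = mid
--             if lo == len(out) or out[lo] != idx:
--                 out.insert(lo, idx)
--     return out
-- ===== Notes on version B (the rewrite author's own statement) =====
-- stated objective: alternative
-- what changed: Replaces A's append-then-sorted(set(...)) pipeline with a single pass that binary-searches each valid index into an output list kept sorted and duplicate-free throughout, so no sort() call and no set are needed.
import Mathlib
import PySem

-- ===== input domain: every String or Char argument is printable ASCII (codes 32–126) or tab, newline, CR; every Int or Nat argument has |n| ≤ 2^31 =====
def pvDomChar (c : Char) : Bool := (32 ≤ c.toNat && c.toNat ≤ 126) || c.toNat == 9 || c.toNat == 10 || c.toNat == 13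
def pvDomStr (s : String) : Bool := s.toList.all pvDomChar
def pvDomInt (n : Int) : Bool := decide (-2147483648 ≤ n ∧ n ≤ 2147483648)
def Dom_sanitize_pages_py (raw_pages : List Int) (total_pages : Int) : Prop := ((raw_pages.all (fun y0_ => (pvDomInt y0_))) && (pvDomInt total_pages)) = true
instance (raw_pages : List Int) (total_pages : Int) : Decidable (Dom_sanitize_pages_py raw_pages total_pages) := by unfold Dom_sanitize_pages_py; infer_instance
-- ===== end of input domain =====

-- B replaces A's append-then-`sorted(set(...))` with a single pass that binary-searches each
-- in-range index into an output list kept sorted and duplicate-free throughout (no sort, no set).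

-- ===== PORT A =====
-- _coerce_int: int(value) on a value that is already an int is the identity (never raises)
def coerce_int_py (value : Int) : Option Int := some value

def sanitize_pages_py (raw_pages : List Int) (total_pages : Int) : List Int :=
  -- isinstance(raw_pages, (list, tuple)) is always true for a List Int argument
  let cleaned := raw_pages.foldl (fun acc item =>
    match coerce_int_py item with
    | none => acc
    | some idx => if 0 ≤ idx ∧ idx < total_pages then acc ++ [idx] else acc) []
  PySem.List.sorted (PySem.Set.ofList cleaned) (fun x => x) false

-- ===== PORT B =====
def coerce_int_alt (value : Int) : Option Int := some value

-- the 'while lo < hi' loop of Source B; lo, hi are Python ints that stay ≥ 0, so Nat is exact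
-- (out[mid] is in range whenever lo < hi ≤ len(out), so pyGetD's default is never used)
def bsLoop (out : List Int) (idx : Int) (lo hi : Nat) : Nat :=
  if lo < hi then
    let mid := (lo + hi) / 2
    if PySem.List.pyGetD out (mid : Int) 0 < idx then bsLoop out idx (mid + 1) hi
    else bsLoop out idx lo mid
  else lo
termination_by hi - lo
decreasing_by all_goals omega

def sanitize_pages_py_alt (raw_pages : List Int) (total_pages : Int) : List Int :=
  raw_pages.foldl (fun out item =>
    match coerce_int_alt item with
    | none => out
    | some idx =>
      if 0 ≤ idx ∧ idx < total_pages then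
        let lo := bsLoop out idx 0 out.length
        if lo = out.length ∨ ¬ PySem.List.pyGetD out (lo : Int) 0 = idx then
          PySem.List.insert out (lo : Int) idx
        else out
      else out) []

-- ===== PRECONDITION & SPEC =====
def Spec_sanitize_pages_py (raw_pages : List Int) (total_pages : Int) (out : List Int) : Prop := out = sanitize_pages_py_alt raw_pages total_pages
instance (raw_pages : List Int) (total_pages : Int) (out : List Int) : Decidable (Spec_sanitize_pages_py raw_pages total_pages out) := by unfold Spec_sanitize_pages_py; infer_instance

-- ===== CLAIM (what is proved, stated in full; the proofs are below) =====
def Claim_equal_sanitize_pages_py : Prop := ∀ (raw_pages : List Int) (total_pages : Int), Dom_sanitize_pages_py raw_pages total_pages → Spec_sanitize_pages_py raw_pages total_pages (sanitize_pages_py raw_pages total_pages)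

-- ===== LEMMAS AND PROOFS =====

-- binary search spec: on a sorted list, the result separates the values < idx from those ≥ idx
lemma bsLoop_spec (out : List Int) (idx : Int)
    (hmono : ∀ i j (hi : i < out.length) (hj : j < out.length), i ≤ j → out[i] ≤ out[j]) :
    ∀ (n lo hi : Nat), hi - lo ≤ n → hi ≤ out.length → lo ≤ hi →
    (∀ j (hj : j < out.length), j < lo → out[j] < idx) →
    (∀ j (hj : j < out.length), hi ≤ j → idx ≤ out[j]) →
    bsLoop out idx lo hi ≤ out.length ∧
      (∀ j (hj : j < out.length), j < bsLoop out idx lo hi → out[j] < idx) ∧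
      (∀ j (hj : j < out.length), bsLoop out idx lo hi ≤ j → idx ≤ out[j]) := by
  intro n
  induction n with
  | zero =>
    intro lo hi hfuel hhi hlohi hb ha
    have hnlt : ¬ lo < hi := by omega
    rw [bsLoop, if_neg hnlt]
    exact ⟨by omega, hb, fun j hj hle => ha j hj (by omega)⟩
  | succ n ih =>
    intro lo hi hfuel hhi hlohi hb ha
    by_cases hlt : lo < hi
    · have hmlen : (lo + hi) / 2 < out.length := by omega
      have hget : PySem.List.pyGetD out (((lo + hi) / 2 : Nat) : Int) 0 = out[(lo + hi) / 2] := by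
        rw [PySem.List.pyGetD_natCast, List.getD_eq_getElem?_getD, List.getElem?_eq_getElem hmlen,
          Option.getD_some]
      rw [bsLoop, if_pos hlt]
      simp only [hget]
      by_cases hc : out[(lo + hi) / 2] < idx
      · rw [if_pos hc]
        refine ih ((lo + hi) / 2 + 1) hi (by omega) hhi (by omega) ?_ ha
        intro j hj hjlo
        exact lt_of_le_of_lt (hmono j ((lo + hi) / 2) hj hmlen (by omega)) hc
      · rw [if_neg hc]
        refine ih lo ((lo + hi) / 2) (by omega) (by omega) (by omega) hb ?_
        intro j hj hle
        exact le_trans (not_lt.mp hc) (hmono ((lo + hi) / 2) j hmlen hj hle)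
    · rw [bsLoop, if_neg hlt]
      exact ⟨by omega, hb, fun j hj hle => ha j hj (by omega)⟩

-- one step of B's loop, on a strictly sorted list: skip a member, insert a non-member in place
lemma step_sorted (out : List Int) (idx : Int)
    (hs : List.Pairwise (· < ·) out) :
    (List.Pairwise (· < ·)
      (if bsLoop out idx 0 out.length = out.length ∨
          ¬ PySem.List.pyGetD out ((bsLoop out idx 0 out.length : Nat) : Int) 0 = idx then
        PySem.List.insert out ((bsLoop out idx 0 out.length : Nat) : Int) idx
      else out)) ∧
    (∀ x, x ∈ (if bsLoop out idx 0 out.length = out.length ∨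
          ¬ PySem.List.pyGetD out ((bsLoop out idx 0 out.length : Nat) : Int) 0 = idx then
        PySem.List.insert out ((bsLoop out idx 0 out.length : Nat) : Int) idx
      else out) ↔ x ∈ out ∨ x = idx) := by
  have hmono : ∀ i j (hi : i < out.length) (hj : j < out.length), i ≤ j → out[i] ≤ out[j] := by
    intro i j hi hj hij
    rcases Nat.lt_or_eq_of_le hij with h | h
    · exact le_of_lt ((List.pairwise_iff_getElem.mp hs) i j hi hj h)
    · subst h; exact le_refl _
  obtain ⟨hr, hlo, hge⟩ := bsLoop_spec out idx hmono out.length 0 out.length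
    (by omega) (le_refl _) (by omega) (fun j hj hjlo => by omega) (fun j hj hle => by omega)
  set r := bsLoop out idx 0 out.length with hrdef
  -- membership at the found position
  have hmem_iff : idx ∈ out ↔ ∃ h : r < out.length, out[r] = idx := by
    constructor
    · intro hin
      obtain ⟨j, hj, hje⟩ := List.mem_iff_getElem.mp hin
      have hjge : r ≤ j := by
        by_contra hlt'
        exact absurd hje (ne_of_lt (hlo j hj (by omega)))
      have hrlen : r < out.length := by omega
      refine ⟨hrlen, le_antisymm ?_ (hge r hrlen (le_refl _))⟩
      calc out[r] ≤ out[j] := hmono r j hrlen hj hjge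
        _ = idx := hje
    · rintro ⟨h, he⟩
      exact he ▸ List.getElem_mem h
  by_cases hcond : r = out.length ∨ ¬ PySem.List.pyGetD out ((r : Nat) : Int) 0 = idx
  · -- idx is not in out: it gets inserted at position r
    have hnot : idx ∉ out := by
      intro hin
      obtain ⟨hrlen, he⟩ := hmem_iff.mp hin
      rcases hcond with h | h
      · omega
      · exact h (by
          rw [PySem.List.pyGetD_natCast, List.getD_eq_getElem?_getD,
            List.getElem?_eq_getElem hrlen, Option.getD_some, he])
    rw [if_pos hcond]
    rw [PySem.List.insert_natCast _ _ _ hr]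
    constructor
    · rw [List.pairwise_append]
      refine ⟨hs.sublist (List.take_sublist _ _), ?_, ?_⟩
      · rw [List.pairwise_cons]
        refine ⟨?_, hs.sublist (List.drop_sublist _ _)⟩
        intro b hb
        obtain ⟨k, hk, hke⟩ := List.mem_iff_getElem.mp hb
        rw [List.getElem_drop] at hke
        have hble : idx ≤ b := hke ▸ hge (r + k) (by simp only [List.length_drop] at hk; omega) (by omega)
        have hbne : idx ≠ b := fun he => hnot (he ▸ hke ▸ List.getElem_mem _)
        exact lt_of_le_of_ne hble hbne
      · intro a ha' b hb
        obtain ⟨j, hj, hje⟩ := List.mem_iff_getElem.mp ha'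
        rw [List.getElem_take] at hje
        have hjlen : j < out.length := by simp at hj; omega
        have halt : a < idx := hje ▸ hlo j hjlen (by simp at hj; omega)
        rcases List.mem_cons.mp hb with rfl | hbd
        · exact halt
        · obtain ⟨k, hk, hke⟩ := List.mem_iff_getElem.mp hbd
          rw [List.getElem_drop] at hke
          exact lt_of_lt_of_le halt (hke ▸ hge (r + k) (by simp only [List.length_drop] at hk; omega) (by omega))
    · intro x
      constructor
      · intro hx
        rcases List.mem_append.mp hx with h | h
        · exact Or.inl (List.mem_of_mem_take h)
        · rcases List.mem_cons.mp h with rfl | h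
          · exact Or.inr rfl
          · exact Or.inl (List.mem_of_mem_drop h)
      · intro hx
        rcases hx with hx | rfl
        · conv at hx => rw [← List.take_append_drop r out]
          rcases List.mem_append.mp hx with h | h
          · exact List.mem_append.mpr (Or.inl h)
          · exact List.mem_append.mpr (Or.inr (List.mem_cons_of_mem _ h))
        · exact List.mem_append.mpr (Or.inr (List.mem_cons_self))
  · -- idx already occurs in out: nothing changes
    have hin : idx ∈ out := by
      push Not at hcond
      obtain ⟨h1, h2⟩ := hcond
      have hrlen : r < out.length := by omega
      rw [PySem.List.pyGetD_natCast, List.getD_eq_getElem?_getD,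
        List.getElem?_eq_getElem hrlen, Option.getD_some] at h2
      exact hmem_iff.mpr ⟨hrlen, h2⟩
    rw [if_neg hcond]
    refine ⟨hs, fun x => ?_⟩
    constructor
    · exact Or.inl
    · rintro (hx | rfl)
      · exact hx
      · exact hin

-- invariant of B's whole pass
lemma fold_inv (T : Int) (l : List Int) (out : List Int)
    (hs : List.Pairwise (· < ·) out) :
    (List.Pairwise (· < ·) (l.foldl (fun out item =>
      if 0 ≤ item ∧ item < T then
        let lo := bsLoop out item 0 out.length
        if lo = out.length ∨ ¬ PySem.List.pyGetD out (lo : Int) 0 = item then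
          PySem.List.insert out (lo : Int) item
        else out
      else out) out)) ∧
    (∀ x, x ∈ (l.foldl (fun out item =>
      if 0 ≤ item ∧ item < T then
        let lo := bsLoop out item 0 out.length
        if lo = out.length ∨ ¬ PySem.List.pyGetD out (lo : Int) 0 = item then
          PySem.List.insert out (lo : Int) item
        else out
      else out) out) ↔ x ∈ out ∨ x ∈ l.filter (fun y => decide (0 ≤ y ∧ y < T))) := by
  induction l generalizing out with
  | nil => exact ⟨hs, fun x => by simp⟩
  | cons a l ih =>
    simp only [List.foldl_cons]
    by_cases hra : 0 ≤ a ∧ a < T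
    · rw [if_pos hra]
      obtain ⟨hstep_sorted', hstep_mem⟩ := step_sorted out a hs
      obtain ⟨hps, hpm⟩ := ih _ hstep_sorted'
      refine ⟨hps, fun x => ?_⟩
      rw [hpm x, hstep_mem x, List.filter_cons_of_pos (by simpa using hra), List.mem_cons]
      tauto
    · rw [if_neg hra]
      obtain ⟨hps, hpm⟩ := ih _ hs
      refine ⟨hps, fun x => ?_⟩
      rw [hpm x, List.filter_cons_of_neg (by simpa using hra)]

-- ===== VERDICT (by name: the statement is the Claim_ definition above) =====
theorem sanitize_pages_py_spec : Claim_equal_sanitize_pages_py := by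
  intro raw_pages total_pages _
  unfold Spec_sanitize_pages_py
  unfold sanitize_pages_py sanitize_pages_py_alt
  simp only [coerce_int_py, coerce_int_alt]
  rw [PySem.List.foldl_append_ite_eq_filter (fun x => 0 ≤ x ∧ x < total_pages)]
  simp only [List.nil_append]
  have h := fold_inv total_pages raw_pages [] List.Pairwise.nil
  apply PySem.List.sorted_eq_of_perm_of_pairwise_lt
  · rw [List.perm_ext_iff_of_nodup (h.1.imp ne_of_lt) (PySem.Set.nodup_ofList _)]
    intro a
    rw [h.2 a, PySem.Set.mem_ofList]
    simp
  · exact h.1
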